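-- pv_equiv track=rewrite | github.com/Youssef-1911/ThreatGPT | backend/app/parsing_engine.py | _normalize_phase
-- ===== SOURCE A (Python) =====
-- def _normalize_phase(phase: str) -> str:
--     normalized_phase = phase.strip().lower().replace(" ", "_").replace("-", "_").replace("/", "_")
--     normalized_phase = "_".join(part for part in normalized_phase.split("_") if part)
--
--     if normalized_phase in {"planning", "plan", "pre_development"}:
--         return "planning"
--     if normalized_phase in {"in_development", "development", "dev"}:
--         return "in_development"
--     if normalized_phase in {"pre_release", "testing", "pre_release_testing"}:
--         return "pre_release"
--     return normalized_phase
-- ===== SOURCE B (Python) =====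
-- _CANON = {
--     "plan": "planning",
--     "planning": "planning",
--     "pre_development": "planning",
--     "in_development": "in_development",
--     "development": "in_development",
--     "dev": "in_development",
--     "pre_release": "pre_release",
--     "testing": "pre_release",
--     "pre_release_testing": "pre_release",
-- }
--
-- _SEPS = " -/_"
--
--
-- def _normalize_phase(phase: str) -> str:
--     # One character-level pass: tokenize on separators while lowering,
--     # then a single canonical-table lookup instead of three membership branches.
--     tokens = []
--     cur = []
--     for ch in phase.strip():
--         if ch in _SEPS:
--             if cur:
--                 tokens.append("".join(cur))
--                 cur = []
--         else:
--             cur.append(ch.lower())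
--     if cur:
--         tokens.append("".join(cur))
--     norm = "_".join(tokens)
--     return _CANON.get(norm, norm)
-- ===== Notes on version B (the rewrite author's own statement) =====
-- stated objective: alternative
-- what changed: Replaces the chained replace/split/join normalization by a single character-level tokenizing pass (lowering as it goes) and collapses the three set-membership branches into one canonical-table dict lookup with fall-through.
import Mathlib
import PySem

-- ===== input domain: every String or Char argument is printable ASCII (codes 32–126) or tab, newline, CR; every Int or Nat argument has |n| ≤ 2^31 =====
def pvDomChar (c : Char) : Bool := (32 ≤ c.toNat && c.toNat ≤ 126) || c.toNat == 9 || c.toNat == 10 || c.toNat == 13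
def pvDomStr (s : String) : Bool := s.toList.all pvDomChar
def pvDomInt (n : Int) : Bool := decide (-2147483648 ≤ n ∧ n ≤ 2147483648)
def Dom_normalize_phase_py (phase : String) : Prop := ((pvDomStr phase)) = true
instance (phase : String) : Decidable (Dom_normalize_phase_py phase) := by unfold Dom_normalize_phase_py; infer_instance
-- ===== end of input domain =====

-- B replaces the chained replace/split/join normalization by a single tokenizing pass and
-- the three membership branches by one canonical-table lookup (objective: alternative).

-- ===== PORT A =====
def normalize_phase_py (phase : String) : String :=
  let np0 := PySem.Str.replace (PySem.Str.replace (PySem.Str.replace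
      (PySem.Str.lower (PySem.Str.strip phase)) " " "_") "-" "_") "/" "_"
  let np := PySem.Str.join "_"
      ((List.map String.ofList (PySem.Chars.splitOn np0.toList ['_'])).filter (fun p => p ≠ ""))
  if PySem.Set.contains (PySem.Set.ofList ["planning", "plan", "pre_development"]) np then "planning"
  else if PySem.Set.contains (PySem.Set.ofList ["in_development", "development", "dev"]) np then "in_development"
  else if PySem.Set.contains (PySem.Set.ofList ["pre_release", "testing", "pre_release_testing"]) np then "pre_release"
  else np

-- ===== PORT B =====
def pvCanon : PySem.Dict String String := PySem.Dict.ofList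
  [("plan", "planning"), ("planning", "planning"), ("pre_development", "planning"),
   ("in_development", "in_development"), ("development", "in_development"), ("dev", "in_development"),
   ("pre_release", "pre_release"), ("testing", "pre_release"), ("pre_release_testing", "pre_release")]

def pvSeps : List Char := [' ', '-', '/', '_']

def pvTokLoop : List Char → List String → List Char → List String × List Char
  | [], toks, cur => (toks, cur)
  | c :: rest, toks, cur =>
    if c ∈ pvSeps then
      if cur ≠ [] then pvTokLoop rest (toks ++ [String.ofList cur]) []
      else pvTokLoop rest toks cur
    else pvTokLoop rest toks (cur ++ [PySem.Chars.lowerChar c])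

def normalize_phase_py_alt (phase : String) : String :=
  let r := pvTokLoop (PySem.Str.strip phase).toList [] []
  let toks := if r.2 ≠ [] then r.1 ++ [String.ofList r.2] else r.1
  let norm := PySem.Str.join "_" toks
  PySem.Dict.getD pvCanon norm norm

-- ===== PRECONDITION & SPEC =====
def Spec_normalize_phase_py (phase : String) (out : String) : Prop := out = normalize_phase_py_alt phase
instance (phase : String) (out : String) : Decidable (Spec_normalize_phase_py phase out) := by unfold Spec_normalize_phase_py; infer_instance

-- ===== CLAIM (what is proved, stated in full; the proofs are below) =====
def Claim_equal_normalize_phase_py : Prop := ∀ (phase : String), Dom_normalize_phase_py phase → Spec_normalize_phase_py phase (normalize_phase_py phase)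

-- ===== LEMMAS AND PROOFS =====

-- the merged character map: lower, then send the three replaced separators to '_'
def pvM (c : Char) : Char :=
  let l := PySem.Chars.lowerChar c
  if l = ' ' ∨ l = '-' ∨ l = '/' then '_' else l

-- single-character replace is a map
theorem pv_replace_go_single (o n : Char) :
    ∀ (l : List Char) (fuel : Nat) (acc : List Char), l.length ≤ fuel →
      PySem.Chars.replace.go [o] [n] fuel l acc =
        acc.reverse ++ l.map (fun c => if c = o then n else c) := by
  intro l
  induction l with
  | nil => intro fuel acc _; cases fuel <;> simp [PySem.Chars.replace.go]
  | cons c t ih =>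
      intro fuel acc h
      cases fuel with
      | zero => simp at h
      | succ fuel =>
        simp only [PySem.Chars.replace.go, List.isPrefixOf]
        by_cases hco : o = c
        · subst hco
          rw [if_pos (by simp), List.length_cons]
          rw [show List.drop ([].length + 1) (o :: t) = t from rfl, show [n].reverse ++ acc = n :: acc from rfl, ih fuel (n :: acc) (by simpa using h)]
          simp
        · rw [if_neg (by simp [hco]), ih fuel (c :: acc) (by simpa using h)]
          simp [if_neg (fun hh : c = o => hco hh.symm)]

theorem pv_replace_single (o n : Char) (l : List Char) :
    PySem.Chars.replace l [o] [n] = l.map (fun c => if c = o then n else c) := by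
  simp [PySem.Chars.replace, pv_replace_go_single o n l l.length [] le_rfl]

-- split-at-'_' specification
def pvSplitU : List Char → List (List Char)
  | [] => [[]]
  | c :: t =>
      if c = '_' then [] :: pvSplitU t
      else
        match pvSplitU t with
        | [] => [[c]]
        | g :: gs => (c :: g) :: gs

def pvConsHead (x : List Char) : List (List Char) → List (List Char)
  | [] => [x]
  | g :: gs => (x ++ g) :: gs

theorem pvSplitU_ne_nil (l : List Char) : pvSplitU l ≠ [] := by
  cases l with
  | nil => simp [pvSplitU]
  | cons c t =>
      simp only [pvSplitU]
      split
      · simp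
      · split <;> simp

theorem pvConsHead_nil_eq (S : List (List Char)) (h : S ≠ []) : pvConsHead [] S = S := by
  cases S with
  | nil => exact absurd rfl h
  | cons g gs => simp [pvConsHead]

theorem pv_splitOn_go (l : List Char) :
    ∀ (fuel : Nat) (cur : List Char) (accs : List (List Char)), l.length < fuel →
      PySem.Chars.splitOn.go ['_'] fuel l cur accs =
        accs.reverse ++ pvConsHead cur.reverse (pvSplitU l) := by
  induction l with
  | nil =>
      intro fuel cur accs h
      cases fuel with
      | zero => omega
      | succ fuel => simp [PySem.Chars.splitOn.go, pvSplitU, pvConsHead]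
  | cons c t ih =>
      intro fuel cur accs h
      cases fuel with
      | zero => simp at h
      | succ fuel =>
        simp only [PySem.Chars.splitOn.go, List.isPrefixOf]
        by_cases hc : c = '_'
        · subst hc
          rw [if_pos (by simp)]
          rw [show List.drop ['_'].length ('_' :: t) = t from rfl,
            ih fuel [] (cur.reverse :: accs) (by simpa using h)]
          rw [List.reverse_nil, pvConsHead_nil_eq _ (pvSplitU_ne_nil t)]
          simp [pvSplitU, pvConsHead]
        · rw [if_neg (by simp only [List.isPrefixOf, Bool.and_eq_true, beq_iff_eq]; exact fun hh => hc hh.1.symm),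
            ih fuel (c :: cur) accs (by simpa using h)]
          simp only [pvSplitU, if_neg hc, List.reverse_cons]
          cases hS : pvSplitU t with
          | nil => exact absurd hS (pvSplitU_ne_nil t)
          | cons g gs => simp [pvConsHead]

theorem pv_splitOn_eq (l : List Char) :
    PySem.Chars.splitOn l ['_'] = pvSplitU l := by
  rw [PySem.Chars.splitOn, pv_splitOn_go l (l.length + 1) [] [] (by omega)]
  simpa using pvConsHead_nil_eq _ (pvSplitU_ne_nil l)

-- facts about the merged character map
theorem pv_toNat_ofNat (n : Nat) (h : n < 55296) : (Char.ofNat n).toNat = n := by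
  have hv : n.isValidChar := Or.inl h
  rw [Char.ofNat, dif_pos hv]
  simp only [Char.ofNatAux, Char.toNat]
  exact BitVec.toNat_ofNatLT n _

theorem pv_lower_toNat {c : Char} (hu : PySem.Chars.isupper c = true) :
    (PySem.Chars.lowerChar c).toNat = c.toNat + 32 := by
  have hb : c.toNat ≤ 90 := by
    simp only [PySem.Chars.isupper, Bool.and_eq_true, decide_eq_true_eq] at hu
    have := Char.le_def.mp hu.2
    rw [UInt32.le_iff_toNat_le] at this
    exact this
  rw [PySem.Chars.lowerChar, if_pos hu, pv_toNat_ofNat _ (by omega)]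

theorem pvM_of_sep {c : Char} (h : c ∈ pvSeps) : pvM c = '_' := by
  simp only [pvSeps, List.mem_cons, List.not_mem_nil, or_false] at h
  rcases h with h | h | h | h <;> subst h <;> decide

theorem pvM_of_not_sep {c : Char} (h : c ∉ pvSeps) :
    pvM c = PySem.Chars.lowerChar c ∧ pvM c ≠ '_' := by
  have h1 : c ≠ ' ' := fun e => h (by simp [pvSeps, e])
  have h2 : c ≠ '-' := fun e => h (by simp [pvSeps, e])
  have h3 : c ≠ '/' := fun e => h (by simp [pvSeps, e])
  have h4 : c ≠ '_' := fun e => h (by simp [pvSeps, e])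
  by_cases hu : PySem.Chars.isupper c = true
  · have hlo : 65 ≤ c.toNat := by
      simp only [PySem.Chars.isupper, Bool.and_eq_true, decide_eq_true_eq] at hu
      have := Char.le_def.mp hu.1
      rw [UInt32.le_iff_toNat_le] at this
      exact this
    have hl := pv_lower_toNat hu
    have hne : ∀ d : Char, (PySem.Chars.lowerChar c).toNat ≠ d.toNat →
        PySem.Chars.lowerChar c ≠ d := fun d hn e => hn (by rw [e])
    have g1 : PySem.Chars.lowerChar c ≠ ' ' := hne _ (by rw [hl]; show _ ≠ 32; omega)
    have g2 : PySem.Chars.lowerChar c ≠ '-' := hne _ (by rw [hl]; show _ ≠ 45; omega)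
    have g3 : PySem.Chars.lowerChar c ≠ '/' := hne _ (by rw [hl]; show _ ≠ 47; omega)
    have g4 : PySem.Chars.lowerChar c ≠ '_' := hne _ (by rw [hl]; show _ ≠ 95; omega)
    have hm : pvM c = PySem.Chars.lowerChar c := by
      rw [pvM]
      exact if_neg (by rintro (e | e | e) <;> [exact g1 e; exact g2 e; exact g3 e])
    exact ⟨hm, hm ▸ g4⟩
  · have hl : PySem.Chars.lowerChar c = c := by
      rw [PySem.Chars.lowerChar, if_neg hu]
    have hm : pvM c = PySem.Chars.lowerChar c := by
      rw [pvM]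
      exact if_neg (by rw [hl]; rintro (e | e | e) <;> [exact h1 e; exact h2 e; exact h3 e])
    exact ⟨hm, by rw [hm, hl]; exact h4⟩

-- the lowered-then-replaced pipeline is one map
theorem pv_chain (s : List Char) :
    PySem.Chars.replace (PySem.Chars.replace (PySem.Chars.replace
      (PySem.Chars.lower s) [' '] ['_']) ['-'] ['_']) ['/'] ['_'] = s.map pvM := by
  simp only [pv_replace_single, PySem.Chars.lower, List.map_map]
  refine List.map_congr_left fun c _ => ?_
  simp only [Function.comp_apply, pvM]
  split_ifs with hx h1 h2 h3 <;> simp_all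

-- the tokenizer loop produces exactly the nonempty groups
def pvFinish (r : List String × List Char) : List String :=
  if r.2 ≠ [] then r.1 ++ [String.ofList r.2] else r.1

theorem pv_tokLoop_spec (l : List Char) :
    ∀ (toks : List String) (cur : List Char),
      pvFinish (pvTokLoop l toks cur) =
        toks ++ ((pvConsHead cur (pvSplitU (l.map pvM))).filter (· ≠ [])).map String.ofList := by
  induction l with
  | nil =>
      intro toks cur
      by_cases hc : cur = []
      · subst hc; simp [pvTokLoop, pvFinish, pvSplitU, pvConsHead]
      · simp [pvTokLoop, pvFinish, pvSplitU, pvConsHead, hc]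
  | cons c t ih =>
      intro toks cur
      by_cases hs : c ∈ pvSeps
      · have hm := pvM_of_sep hs
        have hS := pvSplitU_ne_nil (t.map pvM)
        by_cases hc : cur = []
        · subst hc
          simp only [pvTokLoop]
          rw [if_pos hs, if_neg (by simp), ih toks []]
          simp only [List.map_cons, hm, pvSplitU, if_pos rfl]
          rw [pvConsHead_nil_eq _ hS]
          cases hT : pvSplitU (t.map pvM) with
          | nil => exact absurd hT hS
          | cons g gs => simp [pvConsHead]
        · simp only [pvTokLoop]
          rw [if_pos hs, if_pos hc, ih (toks ++ [String.ofList cur]) []]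
          simp only [List.map_cons, hm, pvSplitU, if_pos rfl]
          rw [pvConsHead_nil_eq _ hS]
          cases hT : pvSplitU (t.map pvM) with
          | nil => exact absurd hT hS
          | cons g gs => simp [pvConsHead, hc]
      · obtain ⟨hm, hm'⟩ := pvM_of_not_sep hs
        simp only [pvTokLoop]
        rw [if_neg hs, ih toks (cur ++ [PySem.Chars.lowerChar c])]
        simp only [List.map_cons, pvSplitU, if_neg (hm ▸ hm' : pvM c ≠ '_')]
        cases hT : pvSplitU (t.map pvM) with
        | nil => exact absurd hT (pvSplitU_ne_nil _)
        | cons g gs => simp [pvConsHead, hm, List.append_assoc]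

theorem pv_ofList_ne_empty (g : List Char) : (String.ofList g ≠ "") = (g ≠ []) := by
  simp only [ne_eq, eq_iff_iff, not_iff_not]
  constructor
  · intro e
    have := congrArg String.toList e
    simpa using this
  · intro e; subst e; rfl

-- the normalized strings agree
theorem pv_norm_eq (phase : String) :
    PySem.Str.join "_"
      ((List.map String.ofList (PySem.Chars.splitOn
        (PySem.Str.replace (PySem.Str.replace (PySem.Str.replace
          (PySem.Str.lower (PySem.Str.strip phase)) " " "_") "-" "_") "/" "_").toList ['_'])).filter
        (fun p => p ≠ "")) =
    PySem.Str.join "_" (pvFinish (pvTokLoop (PySem.Str.strip phase).toList [] [])) := by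
  have htl : (PySem.Str.replace (PySem.Str.replace (PySem.Str.replace
      (PySem.Str.lower (PySem.Str.strip phase)) " " "_") "-" "_") "/" "_").toList =
      (PySem.Str.strip phase).toList.map pvM := by
    simp only [PySem.Str.replace, PySem.Str.lower, String.toList_ofList]
    exact pv_chain _
  rw [htl, pv_splitOn_eq, pv_tokLoop_spec _ [] []]
  rw [List.filter_map, pvConsHead_nil_eq _ (pvSplitU_ne_nil _), List.nil_append]
  exact congrArg (PySem.Str.join "_") (congrArg (List.map String.ofList)
    (List.filter_congr fun g _ => by simp only [Function.comp_apply, pv_ofList_ne_empty]))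

-- the three membership branches are the table lookup
theorem pv_lookup (n : String) :
    (if PySem.Set.contains (PySem.Set.ofList ["planning", "plan", "pre_development"]) n then "planning"
     else if PySem.Set.contains (PySem.Set.ofList ["in_development", "development", "dev"]) n then "in_development"
     else if PySem.Set.contains (PySem.Set.ofList ["pre_release", "testing", "pre_release_testing"]) n then "pre_release"
     else n) = PySem.Dict.getD pvCanon n n := by
  by_cases h1 : n = "planning"
  · subst h1; decide
  by_cases h2 : n = "plan"
  · subst h2; decide
  by_cases h3 : n = "pre_development"
  · subst h3; decide
  by_cases h4 : n = "in_development"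
  · subst h4; decide
  by_cases h5 : n = "development"
  · subst h5; decide
  by_cases h6 : n = "dev"
  · subst h6; decide
  by_cases h7 : n = "pre_release"
  · subst h7; decide
  by_cases h8 : n = "testing"
  · subst h8; decide
  by_cases h9 : n = "pre_release_testing"
  · subst h9; decide
  have g1 : ("planning" == n) = false := beq_eq_false_iff_ne.mpr (fun e => h1 e.symm)
  have g2 : ("plan" == n) = false := beq_eq_false_iff_ne.mpr (fun e => h2 e.symm)
  have g3 : ("pre_development" == n) = false := beq_eq_false_iff_ne.mpr (fun e => h3 e.symm)
  have g4 : ("in_development" == n) = false := beq_eq_false_iff_ne.mpr (fun e => h4 e.symm)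
  have g5 : ("development" == n) = false := beq_eq_false_iff_ne.mpr (fun e => h5 e.symm)
  have g6 : ("dev" == n) = false := beq_eq_false_iff_ne.mpr (fun e => h6 e.symm)
  have g7 : ("pre_release" == n) = false := beq_eq_false_iff_ne.mpr (fun e => h7 e.symm)
  have g8 : ("testing" == n) = false := beq_eq_false_iff_ne.mpr (fun e => h8 e.symm)
  have g9 : ("pre_release_testing" == n) = false := beq_eq_false_iff_ne.mpr (fun e => h9 e.symm)
  simp [pvCanon, PySem.Dict.getD, PySem.Dict.get?, PySem.Dict.ofList, PySem.Dict.empty,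
    PySem.Dict.update, PySem.Dict.insert, PySem.Set.contains,
    PySem.Set.ofList, PySem.Set.add, PySem.Set.empty, List.find?,
    h1, h2, h3, h4, h5, h6, h7, h8, h9, g1, g2, g3, g4, g5, g6, g7, g8, g9]

-- ===== VERDICT (by name: the statement is the Claim_ definition above) =====
set_option maxHeartbeats 1000000 in
theorem normalize_phase_py_spec : Claim_equal_normalize_phase_py := by
  intro phase _
  unfold Spec_normalize_phase_py normalize_phase_py normalize_phase_py_alt
  simp only []
  rw [pv_lookup, pv_norm_eq phase]
  rfl
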